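-- pv_equiv track=rewrite | github.com/Ansh757/nfl-predictor | agent-service/agents/news_sentiment_agent.py | _identify_primary_sentiment_factor
-- ===== SOURCE A (Python) =====
-- from typing import Dict, Any, List
--
-- def _identify_primary_sentiment_factor(sentiment_analysis: Dict) -> str:
--     """Identify the most significant sentiment factor"""
--     key_factors = sentiment_analysis["key_factors"]
--
--     if not key_factors:
--         return "neutral_news_cycle"
--
--     # Look for the most impactful category mentioned in key factors
--     factor_categories = {
--         "team_chemistry": ["argument", "unity", "locker room", "cohesion", "chemistry", "leadership"],
--         "coaching": ["coach", "coordinator", "play-calling", "job security", "friction", "staff"],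
--         "injuries": ["injury", "injured", "returns", "protocol", "questionable", "hurt"],
--         "momentum": ["winning streak", "struggling", "dominant", "confidence", "streak", "performance"],
--         "motivation": ["playoff", "revenge", "eliminated", "motivation", "rivalry", "playoffs"]
--     }
--
--     for category, keywords in factor_categories.items():
--         for factor in key_factors:
--             if any(keyword in factor.lower() for keyword in keywords):
--                 return category
--
--     return "general_sentiment"
-- ===== SOURCE B (Python) =====
-- def _identify_primary_sentiment_factor(sentiment_analysis):
--     """Identify the most significant sentiment factor"""
--     key_factors = sentiment_analysis["key_factors"]
--
--     if not key_factors: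
--         return "neutral_news_cycle"
--
--     # Flat keyword -> category-index table; one pass over the factors keeps
--     # the minimal matched category index, which is exactly the first category
--     # (in table order) that any factor mentions.
--     categories = ["team_chemistry", "coaching", "injuries", "momentum", "motivation"]
--     keyword_index = [
--         ("argument", 0), ("unity", 0), ("locker room", 0), ("cohesion", 0), ("chemistry", 0), ("leadership", 0),
--         ("coach", 1), ("coordinator", 1), ("play-calling", 1), ("job security", 1), ("friction", 1), ("staff", 1),
--         ("injury", 2), ("injured", 2), ("returns", 2), ("protocol", 2), ("questionable", 2), ("hurt", 2),
--         ("winning streak", 3), ("struggling", 3), ("dominant", 3), ("confidence", 3), ("streak", 3), ("performance", 3),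
--         ("playoff", 4), ("revenge", 4), ("eliminated", 4), ("motivation", 4), ("rivalry", 4), ("playoffs", 4),
--     ]
--     best = len(categories)
--     for factor in key_factors:
--         text = factor.lower()
--         for keyword, idx in keyword_index:
--             if idx < best and keyword in text:
--                 best = idx
--     return categories[best] if best < len(categories) else "general_sentiment"
-- ===== Notes on version B (the rewrite author's own statement) =====
-- stated objective: alternative
-- what changed: A does a category-major nested scan with early return; B builds a flat keyword-to-category-index table and makes one pass over the factors keeping the minimal matched category index (a min-fold), then looks up the category name; Pre_ only excludes dicts without a 'key_factors' key, on which both Pythons raise KeyError.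
import Mathlib
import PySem

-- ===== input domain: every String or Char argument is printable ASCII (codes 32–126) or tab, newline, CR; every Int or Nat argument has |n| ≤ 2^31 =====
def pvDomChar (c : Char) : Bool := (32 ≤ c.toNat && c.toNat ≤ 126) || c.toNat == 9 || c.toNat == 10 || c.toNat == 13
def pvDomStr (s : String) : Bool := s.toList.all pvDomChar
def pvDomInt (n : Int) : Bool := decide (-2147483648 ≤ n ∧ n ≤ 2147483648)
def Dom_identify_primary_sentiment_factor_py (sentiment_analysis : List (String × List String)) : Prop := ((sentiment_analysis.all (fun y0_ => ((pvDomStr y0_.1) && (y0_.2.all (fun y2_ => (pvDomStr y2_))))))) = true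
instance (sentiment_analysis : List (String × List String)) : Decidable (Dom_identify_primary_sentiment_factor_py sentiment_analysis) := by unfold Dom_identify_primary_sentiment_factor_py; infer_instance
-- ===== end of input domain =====

-- B replaces A's category-major nested scan (early return on the first matching category)
-- by a flat keyword→category-index table and a single min-fold over the factors (alternative).

-- ===== PORT A =====
-- the literal factor_categories dict of A
def pyFactorCategories : List (String × List String) :=
  [("team_chemistry", ["argument", "unity", "locker room", "cohesion", "chemistry", "leadership"]),
   ("coaching", ["coach", "coordinator", "play-calling", "job security", "friction", "staff"]),
   ("injuries", ["injury", "injured", "returns", "protocol", "questionable", "hurt"]),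
   ("momentum", ["winning streak", "struggling", "dominant", "confidence", "streak", "performance"]),
   ("motivation", ["playoff", "revenge", "eliminated", "motivation", "rivalry", "playoffs"])]

-- A's loops: for category, keywords in factor_categories.items(): for factor in key_factors:
--   if any(keyword in factor.lower() for keyword in keywords): return category
def pyAScan : List (String × List String) → List String → String
  | [], _ => "general_sentiment"
  | (category, keywords) :: rest, key_factors =>
      if key_factors.any (fun factor =>
           keywords.any (fun keyword => PySem.Str.isIn keyword (PySem.Str.lower factor)))
      then category
      else pyAScan rest key_factors

def identify_primary_sentiment_factor_py (sentiment_analysis : List (String × List String)) : String :=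
  let key_factors := (PySem.Dict.get? (PySem.Dict.mk sentiment_analysis) "key_factors").getD []
  if key_factors.isEmpty then "neutral_news_cycle"
  else pyAScan pyFactorCategories key_factors

-- ===== PORT B =====
def pyCategoryNames : List String :=
  ["team_chemistry", "coaching", "injuries", "momentum", "motivation"]

-- B's flat keyword → category-index table
def pyKeywordIndex : List (String × Nat) :=
  [("argument", 0), ("unity", 0), ("locker room", 0), ("cohesion", 0), ("chemistry", 0), ("leadership", 0),
   ("coach", 1), ("coordinator", 1), ("play-calling", 1), ("job security", 1), ("friction", 1), ("staff", 1),
   ("injury", 2), ("injured", 2), ("returns", 2), ("protocol", 2), ("questionable", 2), ("hurt", 2),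
   ("winning streak", 3), ("struggling", 3), ("dominant", 3), ("confidence", 3), ("streak", 3), ("performance", 3),
   ("playoff", 4), ("revenge", 4), ("eliminated", 4), ("motivation", 4), ("rivalry", 4), ("playoffs", 4)]

-- inner loop: for keyword, idx in keyword_index: if idx < best and keyword in text: best = idx
def pyBInner (text : String) (best : Nat) : Nat :=
  pyKeywordIndex.foldl (fun b p => if p.2 < b && PySem.Str.isIn p.1 text then p.2 else b) best

def identify_primary_sentiment_factor_py_alt (sentiment_analysis : List (String × List String)) : String :=
  let key_factors := (PySem.Dict.get? (PySem.Dict.mk sentiment_analysis) "key_factors").getD []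
  if key_factors.isEmpty then "neutral_news_cycle"
  else
    let best := key_factors.foldl (fun b factor => pyBInner (PySem.Str.lower factor) b)
                  pyCategoryNames.length
    if best < pyCategoryNames.length then pyCategoryNames.getD best "general_sentiment"
    else "general_sentiment"

-- ===== PRECONDITION & SPEC =====
-- Pre_ excludes only dicts with no "key_factors" key, on which the Python A raises KeyError.
def Pre_identify_primary_sentiment_factor_py (sentiment_analysis : List (String × List String)) : Prop :=
  sentiment_analysis.any (fun p => p.1 == "key_factors") = true
instance (sentiment_analysis : List (String × List String)) : Decidable (Pre_identify_primary_sentiment_factor_py sentiment_analysis) := by unfold Pre_identify_primary_sentiment_factor_py; infer_instance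

def pvWitness_identify_primary_sentiment_factor_py : (List (String × List String)) :=
  [("key_factors", ["INJURY scare for the QB", "locker room unity"])]

def Spec_identify_primary_sentiment_factor_py (sentiment_analysis : List (String × List String)) (out : String) : Prop := out = identify_primary_sentiment_factor_py_alt sentiment_analysis
instance (sentiment_analysis : List (String × List String)) (out : String) : Decidable (Spec_identify_primary_sentiment_factor_py sentiment_analysis out) := by unfold Spec_identify_primary_sentiment_factor_py; infer_instance

-- ===== CLAIM (what is proved, stated in full; the proofs are below) =====
def Claim_equal_identify_primary_sentiment_factor_py : Prop := ∀ (sentiment_analysis : List (String × List String)), Dom_identify_primary_sentiment_factor_py sentiment_analysis → Pre_identify_primary_sentiment_factor_py sentiment_analysis → Spec_identify_primary_sentiment_factor_py sentiment_analysis (identify_primary_sentiment_factor_py sentiment_analysis)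

-- ===== LEMMAS AND PROOFS =====

-- the multiset of category indices matched by some factor (B's min-fold ranges over it)
def matchIdxs (kfs : List String) : List Nat :=
  kfs.flatMap (fun f =>
    (pyKeywordIndex.filter (fun p => PySem.Str.isIn p.1 (PySem.Str.lower f))).map (·.2))

-- one inner-loop step is a conditional min
theorem step_eq_min (text : String) (b : Nat) (p : String × Nat) :
    (if p.2 < b && PySem.Str.isIn p.1 text then p.2 else b)
      = if PySem.Str.isIn p.1 text then min b p.2 else b := by
  cases h : PySem.Str.isIn p.1 text
  · simp
  · simp only [Bool.and_true, decide_eq_true_eq, if_true]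
    split <;> omega

-- min-fold form of the inner loop, for the conditional-min step function
theorem inner_g_eq_minfold (text : String) :
    ∀ (pairs : List (String × Nat)) (b : Nat),
      pairs.foldl (fun b p => if PySem.Str.isIn p.1 text then min b p.2 else b) b
        = ((pairs.filter (fun p => PySem.Str.isIn p.1 text)).map (·.2)).foldl min b := by
  intro pairs
  induction pairs with
  | nil => intro b; rfl
  | cons p ps ih =>
    intro b
    cases h : PySem.Str.isIn p.1 text <;>
      simp only [List.foldl_cons, List.filter_cons, h, if_true, if_false, Bool.false_eq_true,
        List.map_cons, List.foldl_cons, ih]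

-- the inner loop is a min-fold over the matching indices of one factor
theorem inner_eq_minfold (text : String) (pairs : List (String × Nat)) (b : Nat) :
    pairs.foldl (fun b p => if p.2 < b && PySem.Str.isIn p.1 text then p.2 else b) b
      = ((pairs.filter (fun p => PySem.Str.isIn p.1 text)).map (·.2)).foldl min b := by
  simp only [step_eq_min]
  exact inner_g_eq_minfold text pairs b

-- the whole double loop is a min-fold over matchIdxs
theorem best_eq_minfold : ∀ (kfs : List String) (b : Nat),
    kfs.foldl (fun b factor => pyBInner (PySem.Str.lower factor) b) b
      = (matchIdxs kfs).foldl min b := by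
  intro kfs
  induction kfs with
  | nil => intro b; rfl
  | cons f fs ih =>
    intro b
    rw [List.foldl_cons, ih (pyBInner (PySem.Str.lower f) b)]
    simp only [matchIdxs, List.flatMap_cons, List.foldl_append, pyBInner, inner_eq_minfold]

theorem minfold_le_init : ∀ (l : List Nat) (b : Nat), l.foldl min b ≤ b := by
  intro l
  induction l with
  | nil => intro b; exact Nat.le_refl b
  | cons a l ih => intro b; exact Nat.le_trans (ih (min b a)) (Nat.min_le_left b a)

theorem minfold_le_mem : ∀ (l : List Nat) (b x : Nat), x ∈ l → l.foldl min b ≤ x := by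
  intro l
  induction l with
  | nil => intro b x hx; cases hx
  | cons a l ih =>
    intro b x hx
    rcases List.mem_cons.mp hx with rfl | hx
    · exact Nat.le_trans (minfold_le_init l (min b x)) (Nat.min_le_right b x)
    · exact ih (min b a) x hx

theorem minfold_mem : ∀ (l : List Nat) (b : Nat), l.foldl min b = b ∨ l.foldl min b ∈ l := by
  intro l
  induction l with
  | nil => intro b; exact Or.inl rfl
  | cons a l ih =>
    intro b
    rcases ih (min b a) with h | h
    · rw [List.foldl_cons, h, Nat.min_def]
      split
      · exact Or.inl rfl
      · exact Or.inr List.mem_cons_self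
    · exact Or.inr (List.mem_cons_of_mem a h)

-- A's per-category condition, for the five concrete categories
def catHit (kws : List String) (kfs : List String) : Bool :=
  kfs.any (fun factor => kws.any (fun keyword =>
    PySem.Str.isIn keyword (PySem.Str.lower factor)))

-- membership in matchIdxs ↔ the corresponding category's condition
theorem mem_matchIdxs_iff (kfs : List String) (i : Nat) :
    i ∈ matchIdxs kfs ↔
      ∃ f ∈ kfs, ∃ p ∈ pyKeywordIndex, PySem.Str.isIn p.1 (PySem.Str.lower f) = true ∧ p.2 = i := by
  simp only [matchIdxs, List.mem_flatMap, List.mem_map, List.mem_filter]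
  constructor
  · rintro ⟨f, hf, p, ⟨hp, hm⟩, rfl⟩; exact ⟨f, hf, p, hp, hm, rfl⟩
  · rintro ⟨f, hf, p, hp, hm, rfl⟩; exact ⟨f, hf, p, ⟨hp, hm⟩, rfl⟩

theorem matchIdxs_lt (kfs : List String) : ∀ i ∈ matchIdxs kfs, i < 5 := by
  intro i hi
  obtain ⟨f, _, p, hp, _, rfl⟩ := (mem_matchIdxs_iff kfs i).mp hi
  have : ∀ p ∈ pyKeywordIndex, p.2 < 5 := by decide
  exact this p hp

theorem mem_matchIdxs_iff_catHit (kfs : List String) (i : Nat) (hi : i < 5) :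
    i ∈ matchIdxs kfs ↔ catHit ((pyFactorCategories.getD i ("", [])).2) kfs = true := by
  rw [mem_matchIdxs_iff]
  unfold catHit
  interval_cases i <;>
    simp [pyKeywordIndex, pyFactorCategories, List.any_eq_true]

-- A's scan on the concrete table, phrased through the five category conditions
theorem pyAScan_eq (kfs : List String) :
    pyAScan pyFactorCategories kfs =
      if catHit ["argument", "unity", "locker room", "cohesion", "chemistry", "leadership"] kfs = true then "team_chemistry"
      else if catHit ["coach", "coordinator", "play-calling", "job security", "friction", "staff"] kfs = true then "coaching"
      else if catHit ["injury", "injured", "returns", "protocol", "questionable", "hurt"] kfs = true then "injuries"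
      else if catHit ["winning streak", "struggling", "dominant", "confidence", "streak", "performance"] kfs = true then "momentum"
      else if catHit ["playoff", "revenge", "eliminated", "motivation", "rivalry", "playoffs"] kfs = true then "motivation"
      else "general_sentiment" := rfl

-- ===== VERDICT (by name: the statement is the Claim_ definition above) =====
theorem identify_primary_sentiment_factor_py_spec : Claim_equal_identify_primary_sentiment_factor_py := by
  intro sa _ _
  unfold Spec_identify_primary_sentiment_factor_py identify_primary_sentiment_factor_py
    identify_primary_sentiment_factor_py_alt
  set kfs := (PySem.Dict.get? (PySem.Dict.mk sa) "key_factors").getD [] with hkfs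
  by_cases h : kfs.isEmpty
  · simp [h]
  · simp only [h, Bool.false_eq_true, if_false, best_eq_minfold]
    set L := matchIdxs kfs with hL
    set best := L.foldl min pyCategoryNames.length with hbest
    have hlen : pyCategoryNames.length = 5 := by decide
    have hle : best ≤ 5 := by rw [hbest, hlen]; exact minfold_le_init L 5
    have hmem : best = 5 ∨ best ∈ L := by
      rcases minfold_mem L pyCategoryNames.length with h5 | hm
      · exact Or.inl (by rw [hbest, h5, hlen])
      · exact Or.inr hm
    have hC := fun i hi => mem_matchIdxs_iff_catHit kfs i hi
    have hnotmem : ∀ i : Nat, i < 5 → ¬ catHit ((pyFactorCategories.getD i ("", [])).2) kfs = true →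
        best ≠ i := by
      intro i hi hc hbi
      rcases hmem with h5 | hm
      · omega
      · exact hc ((hC i hi).mp (hbi ▸ hm))
    rw [pyAScan_eq kfs]
    by_cases c0 : catHit ["argument", "unity", "locker room", "cohesion", "chemistry", "leadership"] kfs = true
    · have h0 : (0 : Nat) ∈ L := (hC 0 (by omega)).mpr c0
      have hb : best ≤ 0 := by rw [hbest, hlen]; exact minfold_le_mem L 5 0 h0
      have hb0 : best = 0 := Nat.le_zero.mp hb
      rw [if_pos c0, hb0]; decide
    · by_cases c1 : catHit ["coach", "coordinator", "play-calling", "job security", "friction", "staff"] kfs = true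
      · have h1 : (1 : Nat) ∈ L := (hC 1 (by omega)).mpr c1
        have hb : best ≤ 1 := by rw [hbest, hlen]; exact minfold_le_mem L 5 1 h1
        have hb1 : best = 1 := by have := hnotmem 0 (by omega) c0; omega
        rw [if_neg c0, if_pos c1, hb1]; decide
      · by_cases c2 : catHit ["injury", "injured", "returns", "protocol", "questionable", "hurt"] kfs = true
        · have h2 : (2 : Nat) ∈ L := (hC 2 (by omega)).mpr c2
          have hb : best ≤ 2 := by rw [hbest, hlen]; exact minfold_le_mem L 5 2 h2
          have hb2 : best = 2 := by
            have := hnotmem 0 (by omega) c0; have := hnotmem 1 (by omega) c1; omega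
          rw [if_neg c0, if_neg c1, if_pos c2, hb2]; decide
        · by_cases c3 : catHit ["winning streak", "struggling", "dominant", "confidence", "streak", "performance"] kfs = true
          · have h3 : (3 : Nat) ∈ L := (hC 3 (by omega)).mpr c3
            have hb : best ≤ 3 := by rw [hbest, hlen]; exact minfold_le_mem L 5 3 h3
            have hb3 : best = 3 := by
              have := hnotmem 0 (by omega) c0; have := hnotmem 1 (by omega) c1
              have := hnotmem 2 (by omega) c2; omega
            rw [if_neg c0, if_neg c1, if_neg c2, if_pos c3, hb3]; decide
          · by_cases c4 : catHit ["playoff", "revenge", "eliminated", "motivation", "rivalry", "playoffs"] kfs = true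
            · have h4 : (4 : Nat) ∈ L := (hC 4 (by omega)).mpr c4
              have hb : best ≤ 4 := by rw [hbest, hlen]; exact minfold_le_mem L 5 4 h4
              have hb4 : best = 4 := by
                have := hnotmem 0 (by omega) c0; have := hnotmem 1 (by omega) c1
                have := hnotmem 2 (by omega) c2; have := hnotmem 3 (by omega) c3; omega
              rw [if_neg c0, if_neg c1, if_neg c2, if_neg c3, if_pos c4, hb4]; decide
            · have hb5 : best = 5 := by
                have := hnotmem 0 (by omega) c0; have := hnotmem 1 (by omega) c1
                have := hnotmem 2 (by omega) c2; have := hnotmem 3 (by omega) c3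
                have := hnotmem 4 (by omega) c4
                rcases hmem with h5 | hm
                · exact h5
                · have := matchIdxs_lt kfs best hm; omega
              rw [if_neg c0, if_neg c1, if_neg c2, if_neg c3, if_neg c4, hb5]; decide
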